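-- pv_equiv track=rewrite | github.com/komajun365/competitive_programming | gcj/2021_qual/b.py | calc
-- ===== SOURCE A (Python) =====
-- def calc(x,y,s):
--     n = len(s)
--     inf = 10**9
--     dp = [0,0]
--     if s[0] == 'C':
--         dp[1] = inf
--     elif s[0] == 'J':
--         dp[0] = inf
--
--     for i in range(1,n):
--         dp2 = [0,0]
--         if s[i] == 'C':
--             dp2[0] = min(dp[0], dp[1] + y)
--             dp2[1] = inf
--         elif s[i] == 'J':
--             dp2[1] = min(dp[1], dp[0] + x)
--             dp2[0] = inf
--         else:
--             dp2[0] = min(dp[0], dp[1] + y)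
--             dp2[1] = min(dp[1], dp[0] + x)
--         dp,dp2 = dp2,dp
--
--     return min(dp)
-- ===== SOURCE B (Python) =====
-- def calc(x, y, s):
--     # Top-down memoized recursion best(i, c) = min cost for s[0..i] with
--     # position i assigned c ('C' -> 0, 'J' -> 1); evaluated with an explicit
--     # work stack instead of call recursion (no depth limit).
--     inf = 10**9
--     memo = {}
--
--     def best(i0, c0):
--         stack = [(i0, c0)]
--         while stack:
--             i, c = stack[-1]
--             if (i, c) in memo:
--                 stack.pop()
--                 continue
--             ch = s[i]
--             if (ch == 'C' and c == 1) or (ch == 'J' and c == 0):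
--                 memo[(i, c)] = inf
--                 stack.pop()
--                 continue
--             if i == 0:
--                 memo[(i, c)] = 0
--                 stack.pop()
--                 continue
--             pending = [d for d in ((i - 1, 0), (i - 1, 1)) if d not in memo]
--             if pending:
--                 stack.extend(pending)
--                 continue
--             if c == 0:
--                 memo[(i, c)] = min(memo[(i - 1, 0)], memo[(i - 1, 1)] + y)
--             else:
--                 memo[(i, c)] = min(memo[(i - 1, 1)], memo[(i - 1, 0)] + x)
--             stack.pop()
--         return memo[(i0, c0)]
--
--     return min(best(len(s) - 1, 0), best(len(s) - 1, 1))
-- ===== Notes on version B (the rewrite author's own statement) =====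
-- stated objective: alternative
-- what changed: Replaces the bottom-up two-slot DP loop with a top-down memoized recurrence best(i,c) (min cost of a valid prefix ending in c), evaluated via an explicit work stack and a memo dict instead of the forward array sweep.
import Mathlib
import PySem

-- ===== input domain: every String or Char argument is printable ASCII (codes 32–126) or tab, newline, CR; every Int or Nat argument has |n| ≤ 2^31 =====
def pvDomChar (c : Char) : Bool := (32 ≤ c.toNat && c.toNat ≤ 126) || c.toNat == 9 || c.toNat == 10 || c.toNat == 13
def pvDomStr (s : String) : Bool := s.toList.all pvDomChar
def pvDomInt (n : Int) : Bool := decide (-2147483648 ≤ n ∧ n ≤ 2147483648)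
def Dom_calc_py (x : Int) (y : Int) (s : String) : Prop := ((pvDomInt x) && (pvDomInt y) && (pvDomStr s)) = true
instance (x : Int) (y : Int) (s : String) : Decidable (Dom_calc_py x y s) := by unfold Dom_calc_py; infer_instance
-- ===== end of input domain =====

-- B replaces A's forward two-slot DP sweep by the memoized recurrence best(i,c)
-- evaluated top-down (explicit stack in Python; structural recursion on the index
-- in the Lean port): alternative decomposition, same O(n) cost.


-- ===== PORT A =====
-- A's loop body: dp2 from dp at index i (i ≥ 1).  Pre_ gives s ≠ "", so the
-- getD default is never the character actually branched on at a used index.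
def pvStepA (x : Int) (y : Int) (cs : List Char) (dp : Int × Int) (i : Nat) : Int × Int :=
  if cs.getD i ' ' = 'C' then (min dp.1 (dp.2 + y), 10 ^ 9)
  else if cs.getD i ' ' = 'J' then ((10 : Int) ^ 9, min dp.2 (dp.1 + x))
  else (min dp.1 (dp.2 + y), min dp.2 (dp.1 + x))

def calc_py (x : Int) (y : Int) (s : String) : Int :=
  let cs := s.toList
  let n := cs.length
  let inf : Int := 10 ^ 9
  let dp : Int × Int :=
    if cs.getD 0 ' ' = 'C' then (0, inf)
    else if cs.getD 0 ' ' = 'J' then (inf, 0)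
    else (0, 0)
  let dp := ((List.range n).drop 1).foldl (pvStepA x y cs) dp   -- for i in range(1, n)
  min dp.1 dp.2

-- ===== PORT B =====
-- B's memoized recursion best(i,c): the memo row at index i is the pair
-- (best i 'C', best i 'J'), computed by structural recursion on i.
def pvBest (x : Int) (y : Int) (cs : List Char) : Nat → Int × Int
  | 0 =>
      ((if cs.getD 0 ' ' = 'J' then (10 : Int) ^ 9 else 0),
       (if cs.getD 0 ' ' = 'C' then (10 : Int) ^ 9 else 0))
  | i + 1 =>
      let p := pvBest x y cs i
      ((if cs.getD (i + 1) ' ' = 'J' then (10 : Int) ^ 9 else min p.1 (p.2 + y)),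
       (if cs.getD (i + 1) ' ' = 'C' then (10 : Int) ^ 9 else min p.2 (p.1 + x)))

def calc_py_alt (x : Int) (y : Int) (s : String) : Int :=
  let cs := s.toList
  let p := pvBest x y cs (cs.length - 1)
  min p.1 p.2

-- ===== PRECONDITION & SPEC =====
-- Pre_ excludes only the empty string, on which Python A raises IndexError (s[0]).
def Pre_calc_py (x : Int) (y : Int) (s : String) : Prop := s ≠ ""
instance (x : Int) (y : Int) (s : String) : Decidable (Pre_calc_py x y s) := by unfold Pre_calc_py; infer_instance
def pvWitness_calc_py : Int × Int × String := (3, 5, "C?J")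

def Spec_calc_py (x : Int) (y : Int) (s : String) (out : Int) : Prop := out = calc_py_alt x y s
instance (x : Int) (y : Int) (s : String) (out : Int) : Decidable (Spec_calc_py x y s out) := by unfold Spec_calc_py; infer_instance

-- ===== CLAIM (what is proved, stated in full; the proofs are below) =====
def Claim_equal_calc_py : Prop := ∀ (x : Int) (y : Int) (s : String), Dom_calc_py x y s → Pre_calc_py x y s → Spec_calc_py x y s (calc_py x y s)

-- ===== LEMMAS AND PROOFS =====

-- A's initial dp equals B's memo row 0.
theorem pvInit_eq (x y : Int) (cs : List Char) :
    (if cs.getD 0 ' ' = 'C' then ((0 : Int), (10 : Int) ^ 9)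
     else if cs.getD 0 ' ' = 'J' then ((10 : Int) ^ 9, (0 : Int)) else (0, 0))
      = pvBest x y cs 0 := by
  simp only [pvBest]
  split_ifs <;> simp_all

-- A's step at index i+1 maps memo row i to memo row i+1.
theorem pvStep_best (x y : Int) (cs : List Char) (i : Nat) :
    pvStepA x y cs (pvBest x y cs i) (i + 1) = pvBest x y cs (i + 1) := by
  simp only [pvStepA, pvBest]
  split_ifs <;> simp_all

-- The whole fold over range(1, n+1) computes memo row n.
theorem pvFold_eq (x y : Int) (cs : List Char) (n : Nat) :
    ((List.range (n + 1)).drop 1).foldl (pvStepA x y cs) (pvBest x y cs 0)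
      = pvBest x y cs n := by
  induction n with
  | zero => simp
  | succ k ih =>
      have hr : List.range (k + 1 + 1) = List.range (k + 1) ++ [k + 1] := List.range_succ
      have hd : (List.range (k + 1 + 1)).drop 1 = (List.range (k + 1)).drop 1 ++ [k + 1] := by
        rw [hr, List.drop_append_of_le_length (by simp)]
      rw [hd, List.foldl_append, ih]
      simpa using pvStep_best x y cs k

-- ===== VERDICT (by name: the statement is the Claim_ definition above) =====
theorem calc_py_spec : Claim_equal_calc_py := by
  intro x y s _ hpre
  unfold Spec_calc_py calc_py calc_py_alt
  have hne : s.toList ≠ [] := by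
    intro h
    rw [show ([] : List Char) = "".toList from rfl] at h
    exact hpre (String.toList_injective h)
  obtain ⟨n, hn⟩ : ∃ n, s.toList.length = n + 1 := by
    cases hl : s.toList with
    | nil => exact absurd hl hne
    | cons a t => exact ⟨t.length, by simp⟩
  simp only [hn]
  rw [pvInit_eq x y s.toList, pvFold_eq]
  simp
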